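-- pv_equiv track=rewrite | github.com/OTOYO1020/ChatDev_Intermediate | WareHouse/C_239__20250512095400/lattice_checker.py | is_lattice_point_distance_sqrt5
-- ===== SOURCE A (Python) =====
-- def is_lattice_point_distance_sqrt5(x1: int, y1: int, x2: int, y2: int) -> bool:
--     # Calculate the maximum range needed based on the coordinates of both points
--     range_limit = int(2.5)  # Adjusted to be more dynamic based on distance requirement
--     min_x = min(x1, x2) - range_limit
--     max_x = max(x1, x2) + range_limit
--     min_y = min(y1, y2) - range_limit
--     max_y = max(y1, y2) + range_limit
--     for x in range(min_x, max_x + 1):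
--         for y in range(min_y, max_y + 1):
--             # Calculate squared distances to both points
--             dist1 = (x - x1) ** 2 + (y - y1) ** 2
--             dist2 = (x - x2) ** 2 + (y - y2) ** 2
--             # Check if both distances equal 5
--             if dist1 == 5 and dist2 == 5:
--                 return True
--     return False
-- ===== SOURCE B (Python) =====
-- def is_lattice_point_distance_sqrt5(x1: int, y1: int, x2: int, y2: int) -> bool:
--     # The only lattice points at squared distance 5 from (x1, y1) are its 8
--     # knight-move neighbours; check each one's squared distance to (x2, y2).
--     offsets = ((1, 2), (2, 1), (-1, 2), (-2, 1), (1, -2), (2, -1), (-1, -2), (-2, -1))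
--     return any((x1 + dx - x2) ** 2 + (y1 + dy - y2) ** 2 == 5 for dx, dy in offsets)
-- ===== Notes on version B (the rewrite author's own statement) =====
-- stated objective: faster
-- what changed: Replaces the O(dx*dy) scan of the whole bounding box by a constant-time test of the 8 knight-move offsets of point1 (the only lattice points at squared distance 5 from it).
import Mathlib
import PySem

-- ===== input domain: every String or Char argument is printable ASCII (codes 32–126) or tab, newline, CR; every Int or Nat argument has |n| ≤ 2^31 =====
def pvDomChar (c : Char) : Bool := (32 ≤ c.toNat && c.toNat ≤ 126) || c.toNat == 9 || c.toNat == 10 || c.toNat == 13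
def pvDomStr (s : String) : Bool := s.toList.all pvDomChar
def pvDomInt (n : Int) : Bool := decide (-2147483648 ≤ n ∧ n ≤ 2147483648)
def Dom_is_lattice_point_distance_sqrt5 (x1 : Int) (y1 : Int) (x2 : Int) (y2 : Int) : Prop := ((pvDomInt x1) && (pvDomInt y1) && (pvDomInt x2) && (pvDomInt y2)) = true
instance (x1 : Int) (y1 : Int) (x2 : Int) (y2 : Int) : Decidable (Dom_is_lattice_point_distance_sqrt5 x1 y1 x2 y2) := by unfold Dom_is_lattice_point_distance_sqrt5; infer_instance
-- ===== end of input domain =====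

-- B replaces A's bounding-box scan with a constant-time test of the 8 offsets at squared distance 5 (objective: faster, asymptotic).
-- ===== PORT A =====
def is_lattice_point_distance_sqrt5 (x1 : Int) (y1 : Int) (x2 : Int) (y2 : Int) : Bool :=
  let range_limit : Int := 2  -- int(2.5) == 2
  let min_x := min x1 x2 - range_limit
  let max_x := max x1 x2 + range_limit
  let min_y := min y1 y2 - range_limit
  let max_y := max y1 y2 + range_limit
  -- the early 'return True' inside the pure nested loops is List.any
  (PySem.List.pyRange min_x (max_x + 1) 1).any (fun x =>
    (PySem.List.pyRange min_y (max_y + 1) 1).any (fun y =>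
      let dist1 := (x - x1) ^ 2 + (y - y1) ^ 2
      let dist2 := (x - x2) ^ 2 + (y - y2) ^ 2
      decide (dist1 = 5) && decide (dist2 = 5)))

-- ===== PORT B =====
def sqrt5Offsets : List (Int × Int) :=
  [(1, 2), (2, 1), (-1, 2), (-2, 1), (1, -2), (2, -1), (-1, -2), (-2, -1)]

def is_lattice_point_distance_sqrt5_alt (x1 : Int) (y1 : Int) (x2 : Int) (y2 : Int) : Bool :=
  sqrt5Offsets.any (fun p =>
    decide ((x1 + p.1 - x2) ^ 2 + (y1 + p.2 - y2) ^ 2 = 5))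

-- ===== PRECONDITION & SPEC =====
def Spec_is_lattice_point_distance_sqrt5 (x1 : Int) (y1 : Int) (x2 : Int) (y2 : Int) (out : Bool) : Prop := out = is_lattice_point_distance_sqrt5_alt x1 y1 x2 y2
instance (x1 : Int) (y1 : Int) (x2 : Int) (y2 : Int) (out : Bool) : Decidable (Spec_is_lattice_point_distance_sqrt5 x1 y1 x2 y2 out) := by unfold Spec_is_lattice_point_distance_sqrt5; infer_instance

-- ===== CLAIM (what is proved, stated in full; the proofs are below) =====
def Claim_equal_is_lattice_point_distance_sqrt5 : Prop := ∀ (x1 : Int) (y1 : Int) (x2 : Int) (y2 : Int), Dom_is_lattice_point_distance_sqrt5 x1 y1 x2 y2 → Spec_is_lattice_point_distance_sqrt5 x1 y1 x2 y2 (is_lattice_point_distance_sqrt5 x1 y1 x2 y2)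

-- ===== LEMMAS AND PROOFS =====

-- The integer solutions of a^2 + b^2 = 5 are exactly the 8 knight-move offsets.
theorem sq_sum_eq_five (a b : Int) :
    a ^ 2 + b ^ 2 = 5 ↔
      ((a = 1 ∧ b = 2) ∨ (a = 2 ∧ b = 1) ∨ (a = -1 ∧ b = 2) ∨ (a = -2 ∧ b = 1) ∨
       (a = 1 ∧ b = -2) ∨ (a = 2 ∧ b = -1) ∨ (a = -1 ∧ b = -2) ∨ (a = -2 ∧ b = -1)) := by
  constructor
  · intro h
    have ha : -2 ≤ a ∧ a ≤ 2 := by constructor <;> nlinarith [sq_nonneg a, sq_nonneg b]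
    have hb : -2 ≤ b ∧ b ≤ 2 := by constructor <;> nlinarith [sq_nonneg a, sq_nonneg b]
    obtain ⟨ha1, ha2⟩ := ha
    obtain ⟨hb1, hb2⟩ := hb
    interval_cases a <;> interval_cases b <;> omega
  · rintro (⟨rfl, rfl⟩ | ⟨rfl, rfl⟩ | ⟨rfl, rfl⟩ | ⟨rfl, rfl⟩ | ⟨rfl, rfl⟩ | ⟨rfl, rfl⟩ | ⟨rfl, rfl⟩ | ⟨rfl, rfl⟩) <;> norm_num

theorem ports_agree (x1 y1 x2 y2 : Int) :
    is_lattice_point_distance_sqrt5 x1 y1 x2 y2 = is_lattice_point_distance_sqrt5_alt x1 y1 x2 y2 := by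
  rw [Bool.eq_iff_iff]
  simp only [is_lattice_point_distance_sqrt5, is_lattice_point_distance_sqrt5_alt, sqrt5Offsets,
    List.any_eq_true, PySem.List.mem_pyRange_one, decide_eq_true_eq, Bool.and_eq_true,
    List.mem_cons, List.not_mem_nil, or_false]
  constructor
  · rintro ⟨x, hx, y, hy, h1, h2⟩
    refine ⟨(x - x1, y - y1), ?_, ?_⟩
    · have h5 := (sq_sum_eq_five (x - x1) (y - y1)).mp h1
      simp only [Prod.mk.injEq]
      tauto
    · convert h2 using 2 <;> ring
  · rintro ⟨p, hp, hdist⟩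
    refine ⟨x1 + p.1, ?_, y1 + p.2, ?_, ?_, ?_⟩
    · rcases hp with h | h | h | h | h | h | h | h <;> subst h <;> omega
    · rcases hp with h | h | h | h | h | h | h | h <;> subst h <;> omega
    · rcases hp with h | h | h | h | h | h | h | h <;> subst h <;> norm_num
    · exact hdist

-- ===== VERDICT (by name: the statement is the Claim_ definition above) =====
theorem is_lattice_point_distance_sqrt5_spec : Claim_equal_is_lattice_point_distance_sqrt5 := by
  intro x1 y1 x2 y2 _
  exact ports_agree x1 y1 x2 y2
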